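-- pv_equiv track=rewrite | github.com/charbel08/permutation-alignment | scripts/eval/analyze_c1_keyed_magnitudes.py | _ordered_components
-- ===== SOURCE A (Python) =====
-- def _ordered_components(stats: dict, include_overall: bool = True) -> list[str]:
--     keys = [k for k in stats.keys() if not k.startswith("_")]
--     if not include_overall:
--         keys = [k for k in keys if k != "overall"]
--     keys.sort()
--     if include_overall and "overall" in keys:
--         keys = [k for k in keys if k != "overall"] + ["overall"]
--     return keys
-- ===== SOURCE B (Python) =====
-- def _ordered_components(stats: dict, include_overall: bool = True) -> list[str]:
--     ordered = []
--     saw_overall = False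
--     for k in stats.keys():
--         if k.startswith("_"):
--             continue
--         if k == "overall":
--             saw_overall = include_overall
--             continue
--         i = 0
--         while i < len(ordered) and ordered[i] < k:
--             i += 1
--         ordered.insert(i, k)
--     if saw_overall:
--         ordered.append("overall")
--     return ordered
-- ===== Notes on version B (the rewrite author's own statement) =====
-- stated objective: alternative
-- what changed: Replaces A's staged filter/sort/rebuild (build key list, remove 'overall', timsort, then reconstruct the list to push 'overall' last) with a single pass over the dict keys that maintains a sorted accumulator by positional insertion and a boolean flag for 'overall', appended once at the end.
import Mathlib
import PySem

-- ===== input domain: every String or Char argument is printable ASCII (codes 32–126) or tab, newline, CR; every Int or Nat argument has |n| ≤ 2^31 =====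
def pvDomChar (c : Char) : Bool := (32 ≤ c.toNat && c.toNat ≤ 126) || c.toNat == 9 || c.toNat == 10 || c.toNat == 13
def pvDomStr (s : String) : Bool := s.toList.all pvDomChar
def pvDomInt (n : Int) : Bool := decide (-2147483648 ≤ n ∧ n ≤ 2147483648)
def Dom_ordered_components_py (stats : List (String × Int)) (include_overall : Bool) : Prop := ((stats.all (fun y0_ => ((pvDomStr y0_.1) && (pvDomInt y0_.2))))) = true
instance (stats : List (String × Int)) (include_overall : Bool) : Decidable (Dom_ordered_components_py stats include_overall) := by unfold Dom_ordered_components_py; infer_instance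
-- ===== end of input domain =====

-- B replaces A's staged filter/sort/rebuild with ONE pass over the dict keys that keeps a
-- sorted accumulator by positional insertion and a flag for 'overall', appended at the end.
-- Same result; a genuinely different algorithm (incremental insertion vs sort-then-move).

-- ===== PORT A =====
def ordered_components_py (stats : List (String × Int)) (include_overall : Bool) : List String :=
  let keys := (PySem.List.dedup (stats.map Prod.fst)).filter
      (fun k => !(PySem.Str.startswith k "_"))
  let keys := if include_overall then keys else keys.filter (fun k => !(k == "overall"))
  let keys := PySem.List.sorted keys (fun k => k) false
  if include_overall && keys.contains "overall" then
    keys.filter (fun k => !(k == "overall")) ++ ["overall"]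
  else keys

-- ===== PORT B =====
-- the inner while/insert loop of Source B: walk past smaller elements, insert before the rest
def pvInsertSorted (ordered : List String) (k : String) : List String :=
  match ordered with
  | [] => [k]
  | x :: xs => if x < k then x :: pvInsertSorted xs k else k :: x :: xs

def ordered_components_py_alt (stats : List (String × Int)) (include_overall : Bool) : List String :=
  let r := (PySem.List.dedup (stats.map Prod.fst)).foldl
    (fun (st : List String × Bool) k =>
      if PySem.Str.startswith k "_" then st
      else if k == "overall" then (st.1, include_overall)
      else (pvInsertSorted st.1 k, st.2))
    ([], false)
  if r.2 then r.1 ++ ["overall"] else r.1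

-- ===== PRECONDITION & SPEC =====
def Spec_ordered_components_py (stats : List (String × Int)) (include_overall : Bool) (out : List String) : Prop := out = ordered_components_py_alt stats include_overall
instance (stats : List (String × Int)) (include_overall : Bool) (out : List String) : Decidable (Spec_ordered_components_py stats include_overall out) := by unfold Spec_ordered_components_py; infer_instance

-- ===== CLAIM (what is proved, stated in full; the proofs are below) =====
def Claim_equal_ordered_components_py : Prop := ∀ (stats : List (String × Int)) (include_overall : Bool), Dom_ordered_components_py stats include_overall → Spec_ordered_components_py stats include_overall (ordered_components_py stats include_overall)

-- ===== LEMMAS AND PROOFS =====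

-- B's hand-written insertion is Mathlib's orderedInsert for (· ≤ ·)
theorem pvInsertSorted_eq_orderedInsert (l : List String) (k : String) :
    pvInsertSorted l k = List.orderedInsert (· ≤ ·) k l := by
  induction l with
  | nil => rfl
  | cons x xs ih =>
    by_cases h : x < k
    · simp [pvInsertSorted, List.orderedInsert, h, not_le.mpr h, ih]
    · simp [pvInsertSorted, List.orderedInsert, h, not_lt.mp h]

theorem pvInsertSorted_perm (l : List String) (k : String) :
    (pvInsertSorted l k).Perm (k :: l) := by
  rw [pvInsertSorted_eq_orderedInsert]; exact List.perm_orderedInsert _ _ _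

theorem pvInsertSorted_pairwise (l : List String) (k : String)
    (h : l.Pairwise (· ≤ ·)) : (pvInsertSorted l k).Pairwise (· ≤ ·) := by
  rw [pvInsertSorted_eq_orderedInsert]
  exact List.Pairwise.orderedInsert k l h

theorem foldl_insert_perm (L : List String) :
    ∀ acc : List String, (L.foldl pvInsertSorted acc).Perm (acc ++ L) := by
  induction L with
  | nil => intro acc; simp
  | cons x xs ih =>
    intro acc
    have h1 : (xs.foldl pvInsertSorted (pvInsertSorted acc x)).Perm
        (pvInsertSorted acc x ++ xs) := ih _
    have h2 : (pvInsertSorted acc x ++ xs).Perm ((x :: acc) ++ xs) :=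
      (pvInsertSorted_perm acc x).append_right xs
    have h3 : ((x :: acc) ++ xs).Perm (acc ++ x :: xs) := by
      simpa using (List.perm_middle (a := x) (l₁ := acc) (l₂ := xs)).symm
    exact (h1.trans h2).trans h3

theorem foldl_insert_pairwise (L : List String) :
    ∀ acc : List String, acc.Pairwise (· ≤ ·) →
      (L.foldl pvInsertSorted acc).Pairwise (· ≤ ·) := by
  induction L with
  | nil => intro acc h; simpa using h
  | cons x xs ih => intro acc h; exact ih _ (pvInsertSorted_pairwise acc x h)

-- the insertion-sort fold names the same list as PySem's sorted, for duplicate-free input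
theorem foldl_insert_eq_sorted (L : List String) (hnd : L.Nodup) :
    L.foldl pvInsertSorted [] = PySem.List.sorted L (fun k => k) false := by
  have hperm : (L.foldl pvInsertSorted []).Perm L := by simpa using foldl_insert_perm L []
  have hnd' : (L.foldl pvInsertSorted []).Nodup := hperm.symm.nodup hnd
  have hle : (L.foldl pvInsertSorted []).Pairwise (· ≤ ·) :=
    foldl_insert_pairwise L [] (by simp)
  exact (PySem.List.sorted_eq_of_perm_of_pairwise_lt L (L.foldl pvInsertSorted [])
    (fun k => k) hperm
    ((hle.and hnd').imp (fun h => lt_of_le_of_ne h.1 h.2))).symm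

-- characterisation of B's fold
theorem fold_char (inc : Bool) (L : List String) :
    ∀ (acc : List String) (b : Bool),
      L.foldl
        (fun (st : List String × Bool) k =>
          if PySem.Str.startswith k "_" then st
          else if k == "overall" then (st.1, inc)
          else (pvInsertSorted st.1 k, st.2)) (acc, b)
      = ((L.filter (fun k => !(PySem.Str.startswith k "_") && !(k == "overall"))).foldl
          pvInsertSorted acc,
         if "overall" ∈ L then inc else b) := by
  induction L with
  | nil => intro acc b; simp
  | cons x xs ih =>
    intro acc b
    have hovc : PySem.Chars.startswith ['o','v','e','r','a','l','l'] ['_'] = false := by decide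
    by_cases h1 : PySem.Chars.startswith x.toList ['_'] = true
    · have hx : x ≠ "overall" := by
        rintro rfl
        have h0 : PySem.Chars.startswith "overall".toList ['_'] = false := by decide
        rw [h0] at h1; cases h1
      simp only [List.foldl_cons, List.filter_cons]
      simp [h1, Ne.symm hx]
      simpa using ih acc b
    · by_cases h2 : x = "overall"
      · subst h2
        simp only [List.foldl_cons, List.filter_cons]
        simp [hovc]
        simpa [hovc] using ih acc inc
      · simp only [List.foldl_cons, List.filter_cons]
        simp [h1, h2, Ne.symm h2]
        simpa using ih (pvInsertSorted acc x) b

-- filtering commutes with PySem's sorted, for duplicate-free input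
theorem filter_sorted_comm (L : List String) (hnd : L.Nodup) (p : String → Bool) :
    (PySem.List.sorted L (fun k => k) false).filter p
      = PySem.List.sorted (L.filter p) (fun k => k) false := by
  have hperm : ((PySem.List.sorted L (fun k => k) false).filter p).Perm (L.filter p) :=
    (PySem.List.sorted_perm L (fun k => k) false).filter p
  have hnd' : (PySem.List.sorted L (fun k => k) false).Nodup :=
    (PySem.List.sorted_perm L (fun k => k) false).symm.nodup hnd
  have hle := PySem.List.sorted_pairwise L (fun k => k)
  exact (PySem.List.sorted_eq_of_perm_of_pairwise_lt (L.filter p) _ (fun k => k) hperm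
    (((hle.and hnd').imp (fun h => lt_of_le_of_ne h.1 h.2)).filter p)).symm

-- ===== VERDICT (by name: the statement is the Claim_ definition above) =====
theorem ordered_components_py_spec : Claim_equal_ordered_components_py := by
  intro stats inc _
  unfold Spec_ordered_components_py ordered_components_py ordered_components_py_alt
  set D := PySem.List.dedup (stats.map Prod.fst) with hD
  have hndD : D.Nodup := PySem.List.nodup_dedup _
  rw [fold_char]
  have hf : D.filter (fun k => !(PySem.Str.startswith k "_") && !(k == "overall"))
      = (D.filter (fun k => !(PySem.Str.startswith k "_"))).filter
          (fun k => !(k == "overall")) := by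
    rw [List.filter_filter]
    congr 1; funext k; rw [Bool.and_comm]
  set K := D.filter (fun k => !(PySem.Str.startswith k "_")) with hK
  have hndK : K.Nodup := hndD.filter _
  have hovl : PySem.Chars.startswith ['o','v','e','r','a','l','l'] ['_'] = false := by decide
  have hmemK : ("overall" ∈ K) ↔ ("overall" ∈ D) := by
    simp [hK, List.mem_filter, hovl]
  cases inc with
  | false =>
    simp only [Bool.false_eq_true, if_false, Bool.false_and]
    rw [hf, foldl_insert_eq_sorted _ (hndK.filter _)]
    simp
  | true =>
    simp only [if_true, Bool.true_and]
    by_cases hmem : "overall" ∈ D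
    · rw [if_pos (by simp [PySem.List.mem_sorted, hmemK, hmem]),
        if_pos (by simp [hmem]), hf, foldl_insert_eq_sorted _ (hndK.filter _),
        filter_sorted_comm K hndK]
    · rw [if_neg (by simp [PySem.List.mem_sorted, hmemK, hmem]),
        if_neg (by simp [hmem]), hf, foldl_insert_eq_sorted _ (hndK.filter _)]
      congr 1
      refine (List.filter_eq_self.mpr ?_).symm
      intro a ha
      have : a ≠ "overall" := by rintro rfl; exact hmem (hmemK.mp ha)
      simpa using this
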